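-- pv_equiv track=rewrite | github.com/ShenghangWang/Designing-a-Line-Following-Robot-using-ePuck-with-Additional-Vision-Sensors-and-a-PID-Controller | communication_x_copy.py | rightHalf
-- ===== SOURCE A (Python) =====
-- def rightHalf(resolution, image):
--     result = []
--     width = resolution[0]
--     height = resolution[1]
--     for y in range(0, height):
--         for x in range(width//2, width):
--             pixel = (y*width+x)*3
--             result.append(image[pixel])
--             result.append(image[pixel+1])
--             result.append(image[pixel+2])
--     return ((width//2, height), result)
-- ===== SOURCE B (Python) =====
-- def rightHalf(resolution, image):
--     width, height = resolution
--     half = width // 2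
--     result = []
--     for y in range(height):
--         base = y * width
--         result.extend(image[(base + half) * 3:(base + width) * 3])
--     return ((half, height), result)
-- ===== Notes on version B (the rewrite author's own statement) =====
-- stated objective: simpler
-- what changed: Replaces the nested per-pixel, per-channel append loop by a single loop over rows that copies each row's contiguous right-half run with one slice extend.
import Mathlib
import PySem

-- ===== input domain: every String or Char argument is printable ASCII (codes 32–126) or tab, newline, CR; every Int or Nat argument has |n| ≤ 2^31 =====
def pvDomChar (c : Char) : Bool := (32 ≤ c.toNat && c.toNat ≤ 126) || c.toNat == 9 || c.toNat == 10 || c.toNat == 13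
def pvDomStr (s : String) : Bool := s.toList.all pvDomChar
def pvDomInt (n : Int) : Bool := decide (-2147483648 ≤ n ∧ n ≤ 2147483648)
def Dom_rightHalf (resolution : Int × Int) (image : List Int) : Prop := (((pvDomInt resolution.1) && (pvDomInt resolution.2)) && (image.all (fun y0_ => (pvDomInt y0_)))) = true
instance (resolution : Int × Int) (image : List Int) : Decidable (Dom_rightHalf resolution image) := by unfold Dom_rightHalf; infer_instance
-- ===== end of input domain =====

-- B replaces the nested per-pixel, per-channel appends by one loop over rows that copies
-- each row's contiguous right-half run with a single slice (objective: simpler).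

-- ===== PORT A =====
def rightHalf (resolution : Int × Int) (image : List Int) : (Int × Int) × List Int :=
  let width := resolution.1
  let height := resolution.2
  let result := (PySem.List.pyRange 0 height 1).foldl (fun acc y =>
    (PySem.List.pyRange (PySem.Int.floordiv width 2) width 1).foldl (fun acc2 x =>
      let pixel := (y * width + x) * 3
      ((acc2 ++ [PySem.List.pyGetD image pixel 0]) ++ [PySem.List.pyGetD image (pixel + 1) 0])
        ++ [PySem.List.pyGetD image (pixel + 2) 0]) acc) []
  ((PySem.Int.floordiv width 2, height), result)

-- ===== PORT B =====
def rightHalf_alt (resolution : Int × Int) (image : List Int) : (Int × Int) × List Int :=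
  let width := resolution.1
  let height := resolution.2
  let half := PySem.Int.floordiv width 2
  let result := (PySem.List.pyRange 0 height 1).foldl (fun acc y =>
    let base := y * width
    acc ++ PySem.List.slice image (some ((base + half) * 3)) (some ((base + width) * 3))) []
  ((half, height), result)

-- ===== PRECONDITION & SPEC =====
-- Pre_ excludes exactly the inputs where A raises IndexError: positive resolution with an
-- image shorter than 3*width*height values.
def Pre_rightHalf (resolution : Int × Int) (image : List Int) : Prop :=
  0 < resolution.1 → 0 < resolution.2 → 3 * resolution.1 * resolution.2 ≤ (image.length : Int)
instance (resolution : Int × Int) (image : List Int) : Decidable (Pre_rightHalf resolution image) := by unfold Pre_rightHalf; infer_instance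

def pvWitness_rightHalf : (Int × Int) × List Int := ((2, 1), [10, 20, 30, 40, 50, 60])

def Spec_rightHalf (resolution : Int × Int) (image : List Int) (out : (Int × Int) × List Int) : Prop := out = rightHalf_alt resolution image
instance (resolution : Int × Int) (image : List Int) (out : (Int × Int) × List Int) : Decidable (Spec_rightHalf resolution image out) := by unfold Spec_rightHalf; infer_instance

-- ===== CLAIM (what is proved, stated in full; the proofs are below) =====
def Claim_equal_rightHalf : Prop := ∀ (resolution : Int × Int) (image : List Int), Dom_rightHalf resolution image → Pre_rightHalf resolution image → Spec_rightHalf resolution image (rightHalf resolution image)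

-- ===== LEMMAS AND PROOFS =====

lemma clampIdx_mono_neg (n : Nat) {i j : Int} (h : i ≤ j) (hj : j < 0) :
    PySem.List.clampIdx n i ≤ PySem.List.clampIdx n j := by
  simp only [PySem.List.clampIdx, min_def]
  split_ifs <;> omega

lemma slice_eq_nil_neg {α : Type} (xs : List α) {a b : Int} (hba : b ≤ a) (ha : a < 0) :
    PySem.List.slice xs (some a) (some b) = [] := by
  have hlen := PySem.List.length_slice xs a b
  have hm := clampIdx_mono_neg xs.length hba ha
  exact List.eq_nil_of_length_eq_zero (by omega)

lemma slice_self_eq_nil {α : Type} (xs : List α) (a : Int) :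
    PySem.List.slice xs (some a) (some a) = [] := by
  have hlen := PySem.List.length_slice xs a a
  exact List.eq_nil_of_length_eq_zero (by omega)

lemma take_add_three {α : Type} (l : List α) (m : Nat) (h : m + 2 < l.length) :
    List.take (m + 3) l = List.take m l ++ [l[m]'(by omega), l[m + 1]'(by omega), l[m + 2]'(by omega)] := by
  rw [show m + 3 = m + 1 + 1 + 1 from rfl, List.take_add_one, List.take_add_one, List.take_add_one]
  rw [List.getElem?_eq_getElem (show m < l.length by omega),
      List.getElem?_eq_getElem (show m + 1 < l.length by omega),
      List.getElem?_eq_getElem (show m + 1 + 1 < l.length by omega)]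
  simp only [Option.toList_some, List.append_assoc, List.cons_append,
    List.nil_append]

-- one row's per-pixel triples form the contiguous segment of the image
lemma seg (im : List Int) (q : Int) :
    ∀ (n : Nat) (a : Int), 0 ≤ q + a → (q + a + n) * 3 ≤ (im.length : Int) →
    (PySem.List.pyRange a (a + n) 1).flatMap
      (fun x => [PySem.List.pyGetD im ((q + x) * 3) 0, PySem.List.pyGetD im ((q + x) * 3 + 1) 0,
                 PySem.List.pyGetD im ((q + x) * 3 + 2) 0])
    = List.take (3 * n) (List.drop ((q + a) * 3).toNat im) := by
  intro n
  induction n with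
  | zero =>
    intro a _ _
    simp [PySem.List.pyRange_one_eq_nil (le_refl a)]
  | succ n ih =>
    intro a ha hb
    push_cast at hb
    have hcast : a + ((n + 1 : Nat) : Int) = (a + n) + 1 := by push_cast; ring
    rw [hcast, PySem.List.pyRange_one_succ_right (by omega), List.flatMap_append]
    rw [ih a ha (by omega)]
    have g0 : PySem.List.pyGetD im ((q + (a + (n : Int))) * 3) 0
        = im[((q + a) * 3).toNat + 3 * n]'(by omega) := by
      have hi : (q + (a + (n : Int))) * 3 = ((((q + a) * 3).toNat + 3 * n : Nat) : Int) := by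
        push_cast; omega
      rw [hi, PySem.List.pyGetD_natCast, List.getD_eq_getElem im 0 (by omega)]
    have g1 : PySem.List.pyGetD im ((q + (a + (n : Int))) * 3 + 1) 0
        = im[((q + a) * 3).toNat + 3 * n + 1]'(by omega) := by
      have hi : (q + (a + (n : Int))) * 3 + 1 = ((((q + a) * 3).toNat + 3 * n + 1 : Nat) : Int) := by
        push_cast; omega
      rw [hi, PySem.List.pyGetD_natCast, List.getD_eq_getElem im 0 (by omega)]
    have g2 : PySem.List.pyGetD im ((q + (a + (n : Int))) * 3 + 2) 0
        = im[((q + a) * 3).toNat + 3 * n + 2]'(by omega) := by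
      have hi : (q + (a + (n : Int))) * 3 + 2 = ((((q + a) * 3).toNat + 3 * n + 2 : Nat) : Int) := by
        push_cast; omega
      rw [hi, PySem.List.pyGetD_natCast, List.getD_eq_getElem im 0 (by omega)]
    rw [List.flatMap_singleton, g0, g1, g2]
    have hL : 3 * n + 2 < (List.drop ((q + a) * 3).toNat im).length := by
      rw [List.length_drop]; omega
    rw [show 3 * (n + 1) = 3 * n + 3 from by ring, take_add_three _ _ hL]
    congr 1
    simp only [List.getElem_drop]
    rfl

-- one row of A equals one row of B
lemma row_eq (w : Int) (image : List Int) (y h : Int) (hy : 0 ≤ y) (hyh : y < h)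
    (hpre : 0 < w → 0 < h → 3 * w * h ≤ (image.length : Int)) :
    (PySem.List.pyRange (PySem.Int.floordiv w 2) w 1).flatMap
      (fun x => [PySem.List.pyGetD image ((y * w + x) * 3) 0,
                 PySem.List.pyGetD image ((y * w + x) * 3 + 1) 0,
                 PySem.List.pyGetD image ((y * w + x) * 3 + 2) 0])
    = PySem.List.slice image (some ((y * w + PySem.Int.floordiv w 2) * 3)) (some ((y * w + w) * 3)) := by
  rw [PySem.Int.floordiv_eq_ediv_of_pos (by norm_num)]
  by_cases hw : 0 < w
  · have hhw : 0 ≤ w / 2 ∧ w / 2 ≤ w := by constructor <;> omega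
    have hqn : 0 ≤ y * w := mul_nonneg hy (le_of_lt hw)
    set n : Nat := (w - w / 2).toNat with hn
    have hnw : w / 2 + (n : Int) = w := by omega
    have hbound : (y * w + w / 2 + n) * 3 ≤ (image.length : Int) := by
      have h1 : w * (y + 1) ≤ w * h := mul_le_mul_of_nonneg_left (by omega) (le_of_lt hw)
      have h2 : y * w + w / 2 + (n : Int) = w * (y + 1) := by linear_combination hnw
      have h3 := hpre hw (by omega)
      nlinarith
    have hseg := seg image (y * w) n (w / 2) (by omega) hbound
    rw [show PySem.List.pyRange (w / 2) w 1 = PySem.List.pyRange (w / 2) (w / 2 + (n : Int)) 1 from by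
      rw [hnw], hseg]
    rw [PySem.List.slice_toNat image (a := (y * w + w / 2) * 3) (b := (y * w + w) * 3)
      (by omega) (by omega)]
    congr 1
    omega
  · have hw0 : w ≤ 0 := by omega
    rw [PySem.List.pyRange_one_eq_nil (show w ≤ w / 2 by omega), List.flatMap_nil]
    rcases eq_or_lt_of_le hw0 with heq | hlt
    · subst heq
      have e : (y * (0:Int) + (0:Int) / 2) * 3 = (y * (0:Int) + (0:Int)) * 3 := by norm_num
      rw [e]
      exact (slice_self_eq_nil image _).symm
    · have hyw : 0 ≤ y * (-w) := mul_nonneg hy (by omega)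
      have hyw' : y * w ≤ 0 := by nlinarith
      have hh2 : w / 2 < 0 := by omega
      refine (slice_eq_nil_neg image ?_ ?_).symm
      · nlinarith [show w ≤ w / 2 by omega]
      · nlinarith

-- ===== VERDICT (by name: the statement is the Claim_ definition above) =====
theorem rightHalf_spec : Claim_equal_rightHalf := by
  intro res image _ hpre
  obtain ⟨w, h⟩ := res
  unfold Spec_rightHalf rightHalf rightHalf_alt
  simp only
  refine congrArg _ ?_
  apply PySem.List.foldl_congr_mem
  intro acc y hy
  rw [PySem.List.mem_pyRange_one] at hy
  have hbody : (fun (acc2 : List Int) (x : Int) =>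
      let pixel := (y * w + x) * 3
      ((acc2 ++ [PySem.List.pyGetD image pixel 0]) ++ [PySem.List.pyGetD image (pixel + 1) 0])
        ++ [PySem.List.pyGetD image (pixel + 2) 0]) =
      (fun acc2 x => acc2 ++ [PySem.List.pyGetD image ((y * w + x) * 3) 0,
        PySem.List.pyGetD image ((y * w + x) * 3 + 1) 0,
        PySem.List.pyGetD image ((y * w + x) * 3 + 2) 0]) := by
    funext acc2 x
    simp [List.append_assoc]
  rw [hbody, PySem.List.foldl_append_eq_flatMap]
  exact congrArg _ (row_eq w image y h hy.1 hy.2 hpre)
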